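-- pv_equiv track=rewrite | github.com/cesaregarza/Nerdtracker_Client | nerdtracker_client/util.py | identify_chunks_alternating_indices
-- ===== SOURCE A (Python) =====
-- from typing import TypeVar, cast
--
-- T = TypeVar("T")
--
-- def identify_chunks_alternating_indices(data: list[T]) -> list[int]:
--     """Identifies chunks of consecutive items in a list of items separated by
--     None. The indices of the items in the chunk are alternating between data and
--     None. For example,
--     >>> data = [1, 2, 3, None, 4, 5, 6, None, None, 7, 8, 9, 10]
--
--     can expect a return value of
--     >>> [3, 4, 7, 9]
--
--     because the index of the first
--     None is 3, the index of the next item is 4, the index of the next None is 7,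
--     and the index of the next item is 9. A list with no Nones will return an
--     empty list. A list with all Nones will return [0].
--
--     Args:
--         data (list[T]): The list of items to identify chunks in.
--
--     Returns:
--         list[int]: The list of alternating indices of the items in the chunks.
--     """
--     out: list[int] = []
--     none_chunk: bool = False
--     for index, item in enumerate(data):
--         if item is None and not none_chunk:
--             out.append(index)
--             none_chunk = True
--         elif item is not None and none_chunk:
--             out.append(index)
--             none_chunk = False
--     return out
-- ===== SOURCE B (Python) =====
-- def identify_chunks_alternating_indices(data):
--     """Runs-based reimplementation: walk the list as maximal consecutive runs
--     keyed by `x is None`; emit each run's start index, skipping only a leading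
--     data run."""
--     out = []
--     i = 0
--     n = len(data)
--     first = True
--     while i < n:
--         is_none = data[i] is None
--         j = i + 1
--         while j < n and (data[j] is None) == is_none:
--             j += 1
--         if not (first and not is_none):
--             out.append(i)
--         first = False
--         i = j
--     return out
-- ===== Notes on version B (the rewrite author's own statement) =====
-- stated objective: alternative
-- what changed: Replaces the element-by-element flip-detecting state machine with a runs-then-boundaries traversal: scan maximal consecutive runs keyed by `x is None` and emit each run's start index, skipping only a leading data run.
import Mathlib
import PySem

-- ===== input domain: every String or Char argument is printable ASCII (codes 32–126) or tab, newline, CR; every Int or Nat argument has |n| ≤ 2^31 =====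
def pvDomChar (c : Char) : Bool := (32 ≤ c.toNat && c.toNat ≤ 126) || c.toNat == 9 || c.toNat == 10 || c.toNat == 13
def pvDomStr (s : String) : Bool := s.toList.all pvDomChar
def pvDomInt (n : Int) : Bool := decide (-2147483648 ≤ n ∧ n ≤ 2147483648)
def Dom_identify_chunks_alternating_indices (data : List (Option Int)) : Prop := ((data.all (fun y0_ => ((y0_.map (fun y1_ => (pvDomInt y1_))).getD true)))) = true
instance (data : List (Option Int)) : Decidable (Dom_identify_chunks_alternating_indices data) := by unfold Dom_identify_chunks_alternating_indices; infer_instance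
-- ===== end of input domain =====

-- B replaces A's per-element flip-detecting state machine by a runs-then-boundaries
-- traversal (alternative decomposition, same O(n) cost).

-- ===== PORT A =====
-- literal port of A: fold over enumerate(data) with state (out, none_chunk)
def identify_chunks_alternating_indices (data : List (Option Int)) : List Int :=
  ((PySem.List.enumerate data 0).foldl
    (fun (st : List Int × Bool) (p : Int × Option Int) =>
      if p.2.isNone && !st.2 then (st.1 ++ [p.1], true)
      else if !p.2.isNone && st.2 then (st.1 ++ [p.1], false)
      else st)
    ([], false)).1

-- ===== PORT B =====
-- Source B's inner `while` scanning a maximal same-key run = takeWhile/dropWhile on the rest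
def pvRuns (data : List (Option Int)) : List (Bool × Nat) :=
  match data with
  | [] => []
  | x :: xs =>
    (x.isNone, (xs.takeWhile (fun y => y.isNone == x.isNone)).length + 1)
      :: pvRuns (xs.dropWhile (fun y => y.isNone == x.isNone))
termination_by data.length
decreasing_by
  simpa using Nat.lt_succ_of_le (List.length_dropWhile_le _ _)

-- Source B's outer loop: emit each run's start offset, skipping a leading data run
def pvEmit : List (Bool × Nat) → Int → Bool → List Int
  | [], _, _ => []
  | (k, n) :: rest, off, first =>
    (if first && !k then [] else [off]) ++ pvEmit rest (off + n) false

def identify_chunks_alternating_indices_alt (data : List (Option Int)) : List Int :=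
  pvEmit (pvRuns data) 0 true

-- ===== PRECONDITION & SPEC =====
def Spec_identify_chunks_alternating_indices (data : List (Option Int)) (out : List Int) : Prop := out = identify_chunks_alternating_indices_alt data
instance (data : List (Option Int)) (out : List Int) : Decidable (Spec_identify_chunks_alternating_indices data out) := by unfold Spec_identify_chunks_alternating_indices; infer_instance

-- ===== CLAIM (what is proved, stated in full; the proofs are below) =====
def Claim_equal_identify_chunks_alternating_indices : Prop := ∀ (data : List (Option Int)), Dom_identify_chunks_alternating_indices data → Spec_identify_chunks_alternating_indices data (identify_chunks_alternating_indices data)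

-- ===== LEMMAS AND PROOFS =====

-- proof-side reference function: emit index i whenever the current key differs
-- from the previous element's key (initially false)
def pvSpecRef : List (Option Int) → Bool → Int → List Int
  | [], _, _ => []
  | x :: xs, nc, i =>
    (if x.isNone != nc then [i] else []) ++ pvSpecRef xs x.isNone (i + 1)

lemma foldA_eq : ∀ (xs : List (Option Int)) (acc : List Int) (nc : Bool) (i : Int),
    ((PySem.List.enumerate xs i).foldl
      (fun (st : List Int × Bool) (p : Int × Option Int) =>
        if p.2.isNone && !st.2 then (st.1 ++ [p.1], true)
        else if !p.2.isNone && st.2 then (st.1 ++ [p.1], false)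
        else st)
      (acc, nc)).1 = acc ++ pvSpecRef xs nc i := by
  intro xs
  induction xs with
  | nil => intro acc nc i; simp [PySem.List.enumerate_nil, pvSpecRef]
  | cons x xs ih =>
    intro acc nc i
    rw [PySem.List.enumerate_cons, List.foldl_cons]
    cases x <;> cases nc <;> exact (ih _ _ _).trans (by simp [pvSpecRef])

-- a run of elements all carrying the current key emits nothing
lemma specRef_run : ∀ (grp xs : List (Option Int)) (k : Bool) (i : Int),
    (∀ y ∈ grp, y.isNone = k) →
    pvSpecRef (grp ++ xs) k i = pvSpecRef xs k (i + grp.length) := by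
  intro grp
  induction grp with
  | nil => intro xs k i _; simp
  | cons y grp ih =>
    intro xs k i h
    have hy : y.isNone = k := h y (by simp)
    have := ih xs k (i + 1) (fun z hz => h z (by simp [hz]))
    simp [pvSpecRef, hy, this]
    congr 1
    omega

lemma emit_runs : ∀ (n : Nat) (xs : List (Option Int)), xs.length ≤ n →
    ∀ (i : Int) (nc first : Bool),
    (first = true → nc = false) →
    (first = false → ∀ h : xs ≠ [], (xs.head h).isNone ≠ nc) →
    pvEmit (pvRuns xs) i first = pvSpecRef xs nc i := by
  intro n
  induction n with
  | zero =>
    intro xs hlen i nc first _ _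
    have hx : xs = [] := List.length_eq_zero_iff.mp (Nat.le_zero.mp hlen)
    subst hx
    rw [pvRuns.eq_def]
    simp [pvEmit, pvSpecRef]
  | succ n ih =>
    intro xs hlen i nc first h1 h2
    cases xs with
    | nil =>
      rw [pvRuns.eq_def]
      simp [pvEmit, pvSpecRef]
    | cons x xs =>
      have hxs : xs.takeWhile (fun y => y.isNone == x.isNone)
          ++ xs.dropWhile (fun y => y.isNone == x.isNone) = xs :=
        List.takeWhile_append_dropWhile
      have htk : ∀ y ∈ xs.takeWhile (fun y => y.isNone == x.isNone), y.isNone = x.isNone := by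
        intro y hy
        simpa using List.mem_takeWhile_imp hy
      have hxlen : xs.length ≤ n := by
        simp only [List.length_cons] at hlen
        omega
      have hdlen : (xs.dropWhile (fun y => y.isNone == x.isNone)).length ≤ n :=
        le_trans (List.length_dropWhile_le (fun (y : Option Int) => y.isNone == x.isNone) xs) hxlen
      have hdhead : ∀ h : xs.dropWhile (fun y => y.isNone == x.isNone) ≠ [],
          ((xs.dropWhile (fun y => y.isNone == x.isNone)).head h).isNone ≠ x.isNone := by
        intro h
        have := List.head_dropWhile_not (p := fun (y : Option Int) => y.isNone == x.isNone) (l := xs) h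
        simpa using this
      have hrec := ih (xs.dropWhile (fun y => y.isNone == x.isNone)) hdlen
        (i + ((xs.takeWhile (fun y => y.isNone == x.isNone)).length : Int) + 1) x.isNone false
        (by simp) (fun _ => hdhead)
      have hspec : pvSpecRef (x :: xs) nc i
          = (if x.isNone != nc then [i] else [])
            ++ pvSpecRef (xs.dropWhile (fun y => y.isNone == x.isNone)) x.isNone
                 (i + ((xs.takeWhile (fun y => y.isNone == x.isNone)).length : Int) + 1) := by
        conv_lhs => rw [pvSpecRef, ← hxs]
        rw [specRef_run _ _ _ _ htk,
          show i + 1 + ((xs.takeWhile (fun y => y.isNone == x.isNone)).length : Int)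
            = i + ((xs.takeWhile (fun y => y.isNone == x.isNone)).length : Int) + 1 from by ring]
      rw [pvRuns.eq_def]
      dsimp only
      rw [pvEmit, Nat.cast_add, Nat.cast_one, ← add_assoc, hrec, hspec]
      congr 1
      cases first with
      | true =>
        have hnc : nc = false := h1 rfl
        subst hnc
        cases hx : x.isNone <;> simp
      | false =>
        have hne : x.isNone ≠ nc := by simpa using h2 rfl (List.cons_ne_nil x xs)
        cases hx : x.isNone <;> cases hnc : nc <;> simp_all

theorem ab_eq (data : List (Option Int)) :
    identify_chunks_alternating_indices data = identify_chunks_alternating_indices_alt data := by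
  unfold identify_chunks_alternating_indices identify_chunks_alternating_indices_alt
  rw [foldA_eq data [] false 0,
      emit_runs data.length data (le_refl _) 0 false true (fun _ => rfl) (by simp)]
  simp

-- ===== VERDICT (by name: the statement is the Claim_ definition above) =====
theorem identify_chunks_alternating_indices_spec : Claim_equal_identify_chunks_alternating_indices := by
  intro data _
  unfold Spec_identify_chunks_alternating_indices
  exact ab_eq data
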